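-- pv_equiv track=rewrite | github.com/careweather/SerialKiller2 | SK_common.py | split_preserve_braces
-- ===== SOURCE A (Python) =====
-- def split_preserve_braces(input_str: str) -> list[str]:
--     if not input_str:
--         return []
--
--     in_braces = False
--     current_token = ""
--     tokens = []
--
--     for char in input_str:
--         if char == '{':
--             in_braces = True
--             current_token += char
--         elif char == '}':
--             in_braces = False
--             current_token += char
--         elif char == ',' and not in_braces:
--             if current_token:
--                 tokens.append(current_token.strip())
--                 current_token = ""
--         else:
--             current_token += char
--
--     if current_token:
--         tokens.append(current_token.strip())
--
--     return tokens
-- ===== SOURCE B (Python) =====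
-- def _cut_first(s):
--     """Return (text before the first top-level comma, remainder after it),
--     remainder None when there is no such comma."""
--     in_braces = False
--     for i, ch in enumerate(s):
--         if ch == '{':
--             in_braces = True
--         elif ch == '}':
--             in_braces = False
--         elif ch == ',' and not in_braces:
--             return s[:i], s[i + 1:]
--     return s, None
--
--
-- def split_preserve_braces(input_str: str) -> list[str]:
--     segments = []
--     rest = input_str
--     while rest is not None:
--         head, rest = _cut_first(rest)
--         segments.append(head)
--     return [seg.strip() for seg in segments if seg]
-- ===== Notes on version B (the rewrite author's own statement) =====
-- stated objective: alternative
-- what changed: A interleaves everything in one accumulator loop (growing current_token, stripping and appending at each top-level comma); B decomposes the task: a helper repeatedly cuts off the text before the first top-level comma to collect raw segments, and a final comprehension strips the segments and drops the empty ones.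
import Mathlib
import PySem

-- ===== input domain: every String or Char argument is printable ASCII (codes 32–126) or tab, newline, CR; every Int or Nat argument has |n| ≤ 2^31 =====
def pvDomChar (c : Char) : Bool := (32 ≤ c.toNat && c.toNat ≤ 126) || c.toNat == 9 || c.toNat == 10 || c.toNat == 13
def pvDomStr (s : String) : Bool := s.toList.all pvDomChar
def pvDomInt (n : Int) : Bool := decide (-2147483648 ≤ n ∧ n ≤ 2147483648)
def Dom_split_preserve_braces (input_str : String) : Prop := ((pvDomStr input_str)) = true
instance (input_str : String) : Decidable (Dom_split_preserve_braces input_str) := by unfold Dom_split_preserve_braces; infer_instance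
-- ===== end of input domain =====

-- B re-decomposes A's single accumulator loop as: repeatedly cut off the text before
-- the first top-level comma, then strip/filter the raw segments (objective: alternative).

-- ===== PORT A =====
-- state: (in_braces, current_token, tokens); current_token kept as List Char
def stepA (st : Bool × List Char × List String) (c : Char) : Bool × List Char × List String :=
  match st with
  | (b, cur, toks) =>
    if c = '{' then (true, cur ++ [c], toks)
    else if c = '}' then (false, cur ++ [c], toks)
    else if c = ',' ∧ b = false then
      if cur ≠ [] then (b, [], toks ++ [String.mk (PySem.Chars.strip cur)])
      else (b, cur, toks)
    else (b, cur ++ [c], toks)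

def split_preserve_braces (input_str : String) : List String :=
  if input_str.toList = [] then []
  else
    match input_str.toList.foldl stepA (false, [], []) with
    | (_, cur, toks) =>
      if cur ≠ [] then toks ++ [String.mk (PySem.Chars.strip cur)] else toks

-- ===== PORT B =====
-- _cut_first: text before the first top-level comma, and the remainder (none when no such comma)
def cutFirst (b : Bool) : List Char → List Char × Option (List Char)
  | [] => ([], none)
  | c :: cs =>
    if c = '{' then
      let p := cutFirst true cs; (c :: p.1, p.2)
    else if c = '}' then
      let p := cutFirst false cs; (c :: p.1, p.2)
    else if c = ',' ∧ b = false then ([], some cs)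
    else
      let p := cutFirst b cs; (c :: p.1, p.2)

theorem cutFirst_some_length : ∀ (l : List Char) (b : Bool) (hd t : List Char),
    cutFirst b l = (hd, some t) → t.length < l.length := by
  intro l
  induction l with
  | nil => intro b hd t h; simp [cutFirst] at h
  | cons c cs ih =>
    intro b hd t h
    simp only [cutFirst] at h
    split_ifs at h with h1 h2 h3
    · have := ih true (cutFirst true cs).1 t (by cases hp : cutFirst true cs with
        | mk a r => simp [hp] at h; simp [h.2.symm ▸ hp, hp, ← h.2])
      · simpa using Nat.lt_succ_of_lt this
    · have := ih false (cutFirst false cs).1 t (by cases hp : cutFirst false cs with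
        | mk a r => simp [hp] at h; simp [← h.2])
      · simpa using Nat.lt_succ_of_lt this
    · simp at h; simp [← h.2]
    · have := ih b (cutFirst b cs).1 t (by cases hp : cutFirst b cs with
        | mk a r => simp [hp] at h; simp [← h.2])
      · simpa using Nat.lt_succ_of_lt this

def segsB (l : List Char) : List (List Char) :=
  match h : cutFirst false l with
  | (hd, none) => [hd]
  | (hd, some t) => hd :: segsB t
termination_by l.length
decreasing_by exact cutFirst_some_length l false hd t h

def split_preserve_braces_alt (input_str : String) : List String :=
  ((segsB input_str.toList).filter (· ≠ [])).map (fun s => String.mk (PySem.Chars.strip s))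

-- ===== PRECONDITION & SPEC =====
def Spec_split_preserve_braces (input_str : String) (out : List String) : Prop := out = split_preserve_braces_alt input_str
instance (input_str : String) (out : List String) : Decidable (Spec_split_preserve_braces input_str out) := by unfold Spec_split_preserve_braces; infer_instance

-- ===== CLAIM (what is proved, stated in full; the proofs are below) =====
def Claim_equal_split_preserve_braces : Prop := ∀ (input_str : String), Dom_split_preserve_braces input_str → Spec_split_preserve_braces input_str (split_preserve_braces input_str)

-- ===== LEMMAS AND PROOFS =====

/-- reference: the raw top-level segments of `l`, given current brace state `b` -/
def fref : Bool → List Char → List (List Char)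
  | _, [] => [[]]
  | b, c :: cs =>
    if c = '{' then (fref true cs).modifyHead (c :: ·)
    else if c = '}' then (fref false cs).modifyHead (c :: ·)
    else if c = ',' ∧ b = false then [] :: fref false cs
    else (fref b cs).modifyHead (c :: ·)

def procSegs (ss : List (List Char)) : List String :=
  (ss.filter (· ≠ [])).map (fun s => String.mk (PySem.Chars.strip s))

theorem fref_ne_nil (b : Bool) (l : List Char) : fref b l ≠ [] := by
  cases l with
  | nil => simp [fref]
  | cons c cs =>
    simp only [fref]
    split_ifs <;> simp [List.modifyHead] <;>
      first
      | (cases h : fref true cs with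
         | nil => exact absurd h (fref_ne_nil true cs)
         | cons a t => simp)
      | (cases h : fref false cs with
         | nil => exact absurd h (fref_ne_nil false cs)
         | cons a t => simp)
      | (cases h : fref b cs with
         | nil => exact absurd h (fref_ne_nil b cs)
         | cons a t => simp)

theorem foldA_eq : ∀ (l : List Char) (b : Bool) (cur : List Char) (toks : List String),
    (if (l.foldl stepA (b, cur, toks)).2.1 = [] then (l.foldl stepA (b, cur, toks)).2.2
     else (l.foldl stepA (b, cur, toks)).2.2
          ++ [String.mk (PySem.Chars.strip (l.foldl stepA (b, cur, toks)).2.1)])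
    = toks ++ procSegs ((fref b l).modifyHead (cur ++ ·)) := by
  intro l
  induction l with
  | nil =>
    intro b cur toks
    by_cases hc : cur = [] <;> simp [fref, procSegs, hc, List.modifyHead]
  | cons c cs ih =>
    intro b cur toks
    simp only [List.foldl_cons]
    by_cases h1 : c = '{'
    · simp only [stepA, if_pos h1]
      rw [ih true (cur ++ [c]) toks]
      simp only [fref, if_pos h1, List.modifyHead_modifyHead]
      congr 3
      funext s; simp
    · by_cases h2 : c = '}'
      · simp only [stepA, if_neg h1, if_pos h2]
        rw [ih false (cur ++ [c]) toks]
        simp only [fref, if_neg h1, if_pos h2, List.modifyHead_modifyHead]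
        congr 3
        funext s; simp
      · by_cases h3 : c = ',' ∧ b = false
        · obtain ⟨hc, hb⟩ := h3
          subst hb
          by_cases hcur : cur = []
          · have hstep : stepA (false, cur, toks) c = (false, cur, toks) := by
              simp [stepA, hc, hcur]
            rw [hstep, ih false cur toks]
            simp only [fref, if_neg h1, if_neg h2, if_pos (⟨hc, rfl⟩ : c = ',' ∧ false = false)]
            subst hcur
            cases h : fref false cs with
            | nil => exact absurd h (fref_ne_nil false cs)
            | cons a t => simp [List.modifyHead, procSegs, hc]
          · have hstep : stepA (false, cur, toks) c
                = (false, [], toks ++ [String.mk (PySem.Chars.strip cur)]) := by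
              simp [stepA, hc, hcur]
            rw [hstep, ih false [] (toks ++ [String.mk (PySem.Chars.strip cur)])]
            simp only [fref, if_neg h1, if_neg h2, if_pos (⟨hc, rfl⟩ : c = ',' ∧ false = false)]
            cases h : fref false cs with
            | nil => exact absurd h (fref_ne_nil false cs)
            | cons a t => simp [List.modifyHead, procSegs, hc, hcur, List.append_assoc]
        · simp only [stepA, if_neg h1, if_neg h2, if_neg h3]
          rw [ih b (cur ++ [c]) toks]
          simp only [fref, if_neg h1, if_neg h2, if_neg h3, List.modifyHead_modifyHead]
          congr 3
          funext s; simp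

theorem cutFirst_fref : ∀ (l : List Char) (b : Bool),
    fref b l = (cutFirst b l).1 ::
      (match (cutFirst b l).2 with | none => [] | some t => fref false t) := by
  intro l
  induction l with
  | nil => intro b; simp [fref, cutFirst]
  | cons c cs ih =>
    intro b
    simp only [fref, cutFirst]
    split_ifs with h1 h2 h3
    · rw [ih true]; rfl
    · rw [ih false]; rfl
    · simp
    · rw [ih b]; rfl

theorem segsB_eq_aux : ∀ (n : Nat) (l : List Char), l.length ≤ n → segsB l = fref false l := by
  intro n
  induction n with
  | zero =>
    intro l hl
    have hnil : l = [] := List.eq_nil_of_length_eq_zero (Nat.le_zero.mp hl)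
    subst hnil
    unfold segsB
    rfl
  | succ n ih =>
    intro l hl
    rw [cutFirst_fref l false]
    unfold segsB
    cases h : cutFirst false l with
    | mk hd r =>
      cases r with
      | none => rfl
      | some t =>
        have hlt := cutFirst_some_length l false hd t h
        simp only []
        rw [ih t (by omega)]

theorem segsB_eq (l : List Char) : segsB l = fref false l := segsB_eq_aux l.length l le_rfl

-- ===== VERDICT (by name: the statement is the Claim_ definition above) =====
theorem split_preserve_braces_spec : Claim_equal_split_preserve_braces := by
  intro input_str _
  unfold Spec_split_preserve_braces split_preserve_braces split_preserve_braces_alt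
  rw [segsB_eq]
  by_cases h : input_str.toList = []
  · simp [h, fref]
  · rw [if_neg h]
    have key := foldA_eq input_str.toList false [] []
    simp only [List.nil_append] at key
    have hid : (fref false input_str.toList).modifyHead (fun x => x)
        = fref false input_str.toList := by
      cases hf : fref false input_str.toList with
      | nil => rfl
      | cons a t => simp [List.modifyHead]
    rw [hid] at key
    calc (match input_str.toList.foldl stepA (false, [], []) with
          | (_, cur, toks) =>
            if cur ≠ [] then toks ++ [String.mk (PySem.Chars.strip cur)] else toks)
        = (if (input_str.toList.foldl stepA (false, [], [])).2.1 = []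
           then (input_str.toList.foldl stepA (false, [], [])).2.2
           else (input_str.toList.foldl stepA (false, [], [])).2.2
                ++ [String.mk (PySem.Chars.strip (input_str.toList.foldl stepA (false, [], [])).2.1)]) := by
          rcases input_str.toList.foldl stepA (false, [], []) with ⟨b, cur, toks⟩
          by_cases hc : cur = [] <;> simp [hc]
      _ = procSegs (fref false input_str.toList) := key
      _ = ((fref false input_str.toList).filter (· ≠ [])).map
            (fun s => String.mk (PySem.Chars.strip s)) := rfl
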